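-- pv_equiv track=rewrite | github.com/Kulak-Informatica/Python | Oefeningen/Toets3/Catan.py | wisselen
-- ===== SOURCE A (Python) =====
-- def wisselen_mogelijk(ruilmarkt, grondstof, verzameldegrondstoffen):
--     lengte = len(ruilmarkt[grondstof])
--     for i in ruilmarkt[grondstof]:
--         if i in verzameldegrondstoffen:
--             lengte -= 1
--     if lengte == 0:
--         return True
--     else:
--         return False
--
-- def bereken_ruilmiddelen(ruilmarkt, lijst):
--     lijstdict = {}
--     for i in lijst:
--         for b in ruilmarkt[i]:
--             if b in lijstdict:
--                 lijstdict[b] += 1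
--             else:
--                 lijstdict[b] = 1
--
--     return lijstdict
--
-- def wisselen(ruilmarkt, grondstof, bezit):
--     if wisselen_mogelijk(ruilmarkt, grondstof, bezit) == True:
--         hoeveelheid = bereken_ruilmiddelen(ruilmarkt, [grondstof])
--
--         for key, value in hoeveelheid.items():
--             for i in range(value):
--                 index = bezit.index(key)
--                 bezit.pop(index)
--         bezit += [grondstof]
--
--     return bezit
-- ===== SOURCE B (Python) =====
-- def wisselen(ruilmarkt, grondstof, bezit):
--     nodig = ruilmarkt[grondstof]
--     if all(r in bezit for r in nodig):
--         for r in nodig: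
--             bezit.remove(r)
--         bezit.append(grondstof)
--     return bezit
-- ===== Notes on version B (the rewrite author's own statement) =====
-- stated objective: simpler
-- what changed: Inlines the three helpers into one function: feasibility is an all() membership test instead of a counted-down length, and the exchange removes each required resource directly with list.remove while iterating the market list once, eliminating the intermediate count dictionary and the range/index/pop inner loops.
import Mathlib
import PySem

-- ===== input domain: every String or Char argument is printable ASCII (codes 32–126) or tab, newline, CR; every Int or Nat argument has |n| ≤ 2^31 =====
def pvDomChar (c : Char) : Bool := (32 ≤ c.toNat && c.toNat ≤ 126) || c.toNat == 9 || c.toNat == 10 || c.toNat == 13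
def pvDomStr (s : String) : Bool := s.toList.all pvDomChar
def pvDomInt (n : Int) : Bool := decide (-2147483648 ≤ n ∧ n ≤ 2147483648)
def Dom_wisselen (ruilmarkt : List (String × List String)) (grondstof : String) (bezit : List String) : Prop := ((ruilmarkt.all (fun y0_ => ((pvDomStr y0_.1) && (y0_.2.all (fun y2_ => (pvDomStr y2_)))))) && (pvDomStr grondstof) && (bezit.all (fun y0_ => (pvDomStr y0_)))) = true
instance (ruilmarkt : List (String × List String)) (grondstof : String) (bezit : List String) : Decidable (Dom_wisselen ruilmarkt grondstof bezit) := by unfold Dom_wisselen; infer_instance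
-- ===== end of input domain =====

-- B inlines A's three helpers: an `all` membership test replaces the counted-down
-- length, and one direct pass of list.remove over the market list replaces the
-- count-dictionary plus range/index/pop loops (objective: simpler).
-- Both Pythons mutate `bezit` in place; the equivalence proved here is about the return value.

-- ===== PORT A =====
-- helper wisselen_mogelijk; ruilmarkt[grondstof] raises KeyError when the key is absent:
-- ported as getD [] and the absent-key inputs are excluded by Pre_wisselen.
def wisselenMogelijk (ruilmarkt : List (String × List String)) (grondstof : String) (verzameldegrondstoffen : List String) : Bool :=
  let req := ((PySem.Dict.mk ruilmarkt).get? grondstof).getD []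
  let lengte := req.foldl (fun n i => if verzameldegrondstoffen.contains i then n - 1 else n) (req.length : Int)
  if lengte == 0 then true else false

-- helper bereken_ruilmiddelen (the `if b in lijstdict: +=1 else: =1` branches are exactly Dict.modify b 0 (+1))
def berekenRuilmiddelen (ruilmarkt : List (String × List String)) (lijst : List String) : PySem.Dict String Int :=
  lijst.foldl (fun d i => (((PySem.Dict.mk ruilmarkt).get? i).getD []).foldl (fun d b => d.modify b 0 (· + 1)) d) PySem.Dict.empty

-- bezit.index(key) / bezit.pop(index); a failing index is a ValueError, excluded by Pre_wisselen (fallback bz is unreached there)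
def wisselen (ruilmarkt : List (String × List String)) (grondstof : String) (bezit : List String) : List String :=
  if wisselenMogelijk ruilmarkt grondstof bezit == true then
    let hoeveelheid := berekenRuilmiddelen ruilmarkt [grondstof]
    let bezit' := hoeveelheid.items.foldl (fun bz kv =>
      (PySem.List.pyRange 0 kv.2 1).foldl (fun bz _ =>
        match PySem.List.index? bz kv.1 with
        | some idx =>
          match PySem.List.pop? bz (idx : Int) with
          | some r => r.2
          | none => bz
        | none => bz) bz) bezit
    bezit' ++ [grondstof]
  else bezit

-- ===== PORT B =====
-- bezit.remove(r) = PySem.List.remove?; a `none` would be a ValueError, excluded by Pre_wisselen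
def wisselen_alt (ruilmarkt : List (String × List String)) (grondstof : String) (bezit : List String) : List String :=
  let nodig := ((PySem.Dict.mk ruilmarkt).get? grondstof).getD []
  if nodig.all (fun r => bezit.contains r) then
    (nodig.foldl (fun bz r => (PySem.List.remove? bz r).getD bz) bezit) ++ [grondstof]
  else bezit

-- ===== PRECONDITION & SPEC =====
-- Pre_ excludes exactly the inputs where the Python raises: a grondstof that is not a key of
-- ruilmarkt (KeyError), and the duplicate-shortage case where every required resource is a member
-- of bezit but some required resource occurs more often in the requirement than in bezit
-- (bezit.index / list.remove then raises ValueError mid-loop, in A and in B alike).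
def Pre_wisselen (ruilmarkt : List (String × List String)) (grondstof : String) (bezit : List String) : Prop :=
  ((PySem.Dict.mk ruilmarkt).get? grondstof).isSome = true ∧
  ((∀ r ∈ ((PySem.Dict.mk ruilmarkt).get? grondstof).getD [], r ∈ bezit) →
    ∀ r ∈ ((PySem.Dict.mk ruilmarkt).get? grondstof).getD [],
      List.count r (((PySem.Dict.mk ruilmarkt).get? grondstof).getD []) ≤ List.count r bezit)
instance (ruilmarkt : List (String × List String)) (grondstof : String) (bezit : List String) : Decidable (Pre_wisselen ruilmarkt grondstof bezit) := by unfold Pre_wisselen; infer_instance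

def pvWitness_wisselen : (List (String × List String)) × String × List String :=
  ([("hout", ["wol", "wol"]), ("steen", ["hout"])], "hout", ["wol", "graan", "wol"])

def Spec_wisselen (ruilmarkt : List (String × List String)) (grondstof : String) (bezit : List String) (out : List String) : Prop := out = wisselen_alt ruilmarkt grondstof bezit
instance (ruilmarkt : List (String × List String)) (grondstof : String) (bezit : List String) (out : List String) : Decidable (Spec_wisselen ruilmarkt grondstof bezit out) := by unfold Spec_wisselen; infer_instance

-- ===== CLAIM (what is proved, stated in full; the proofs are below) =====
def Claim_equal_wisselen : Prop := ∀ (ruilmarkt : List (String × List String)) (grondstof : String) (bezit : List String), Dom_wisselen ruilmarkt grondstof bezit → Pre_wisselen ruilmarkt grondstof bezit → Spec_wisselen ruilmarkt grondstof bezit (wisselen ruilmarkt grondstof bezit)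

-- ===== LEMMAS AND PROOFS =====

-- A's counted-down feasibility loop computes len(req) minus the number of members.
theorem pv_foldl_countdown (bezit : List String) :
    ∀ (req : List String) (n : Int),
      req.foldl (fun n i => if bezit.contains i then n - 1 else n) n
        = n - ((req.filter (fun i => bezit.contains i)).length : Int) := by
  intro req
  induction req with
  | nil => intro n; simp
  | cons h t ih =>
    intro n
    rw [List.foldl_cons, List.filter_cons]
    by_cases hm : bezit.contains h = true
    · rw [if_pos hm, if_pos hm, ih, List.length_cons]
      push_cast; ring
    · rw [if_neg hm, if_neg hm, ih]

-- A's feasibility test equals B's `all` membership test.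
theorem pv_mogelijk_eq_all (ruilmarkt : List (String × List String)) (grondstof : String) (bezit : List String) :
    wisselenMogelijk ruilmarkt grondstof bezit
      = (((PySem.Dict.mk ruilmarkt).get? grondstof).getD []).all (fun r => bezit.contains r) := by
  simp only [wisselenMogelijk]
  set req := ((PySem.Dict.mk ruilmarkt).get? grondstof).getD [] with hreq
  rw [pv_foldl_countdown]
  by_cases hall : req.all (fun r => bezit.contains r) = true
  · have hfl : req.filter (fun i => bezit.contains i) = req :=
      List.filter_eq_self.mpr (by simpa [List.all_eq_true] using hall)
    rw [hfl, hall]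
    simp
  · have hfalse : (req.all fun r => bezit.contains r) = false := by simpa using hall
    have hlt : (req.filter (fun i => bezit.contains i)).length < req.length :=
      List.length_filter_lt_length_iff_exists.mpr (by simpa [List.all_eq_true] using hall)
    have hne : ((req.length : Int) - ((req.filter (fun i => bezit.contains i)).length : Int)) ≠ 0 := by
      omega
    have hne' : ¬((((req.length : Int) - ((req.filter (fun i => bezit.contains i)).length : Int)) == 0) = true) := by
      simpa using hne
    rw [hfalse, if_neg hne']

-- One step of A's exchange loop (index then pop) is List.erase.
theorem pv_indexpop_eq_erase (x : String) :
    ∀ (bz : List String),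
      (match PySem.List.index? bz x with
       | some idx =>
         match PySem.List.pop? bz (idx : Int) with
         | some r => r.2
         | none => bz
       | none => bz) = bz.erase x := by
  intro bz
  induction bz with
  | nil => simp [PySem.List.index?_eq_idxOf?]
  | cons h t ih =>
    by_cases hx : h = x
    · subst hx
      rw [PySem.List.index?_cons_self]
      simp [PySem.List.pop?_zero_cons]
    · rw [PySem.List.index?_cons_of_ne t hx]
      cases hidx : PySem.List.index? t x with
      | none =>
        have hnm : x ∉ t := (PySem.List.index?_eq_none_iff t x).mp hidx
        have hnm' : x ∉ h :: t := by
          intro hmem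
          rcases List.mem_cons.mp hmem with he | hmem2
          · exact hx he.symm
          · exact hnm hmem2
        simp [List.erase_of_not_mem hnm']
      | some i =>
        obtain ⟨hk, -, -⟩ := PySem.List.getElem_of_index?_eq_some hidx
        have hk1 : i + 1 < (h :: t).length := by simpa using Nat.succ_lt_succ hk
        rw [hidx] at ih
        have ih2 : t.eraseIdx i = t.erase x := by
          simpa [PySem.List.pop?_natCast t i hk] using ih
        have hbe : ¬((h == x) = true) := by simp [hx]
        have hpop : PySem.List.pop? (h :: t) ((i : Int) + 1)
            = some ((h :: t)[i + 1]'hk1, h :: t.eraseIdx i) := by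
          have hnc := PySem.List.pop?_natCast (h :: t) (i + 1) hk1
          simpa [List.eraseIdx_cons_succ] using hnc
        simp [hpop, List.erase_cons_tail hbe, ih2]

-- One step of B's exchange loop (list.remove) is List.erase too.
theorem pv_remove_eq_erase (bz : List String) (x : String) :
    (PySem.List.remove? bz x).getD bz = bz.erase x := by
  by_cases hm : x ∈ bz
  · rw [PySem.List.remove?_eq_some_erase bz x hm]; rfl
  · rw [(PySem.List.remove?_eq_none_iff bz x).mpr hm, List.erase_of_not_mem hm]
    rfl

-- A fold that ignores the elements is an iterate.
theorem pv_foldl_const {α β : Type} (g : β → β) :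
    ∀ (L : List α) (b : β), L.foldl (fun b _ => g b) b = g^[L.length] b := by
  intro L
  induction L with
  | nil => intro b; simp
  | cons h t ih => intro b; simp [List.foldl_cons, ih, Function.iterate_succ_apply]

-- erasing k n times is folding erase over n copies of k.
theorem pv_iterate_erase_eq_foldl_replicate (k : String) :
    ∀ (n : Nat) (b : List String),
      (fun bz => bz.erase k)^[n] b = (List.replicate n k).foldl List.erase b := by
  intro n
  induction n with
  | zero => intro b; simp
  | succ m ih => intro b; simp [List.replicate_succ, Function.iterate_succ_apply, ih]

-- grouped fold (per distinct key, count-many erasures) = fold over the expanded list.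
theorem pv_grouped_eq_flat (c : String → Nat) :
    ∀ (d : List String) (b : List String),
      d.foldl (fun bz k => (fun bz => bz.erase k)^[c k] bz) b
        = (d.flatMap (fun k => List.replicate (c k) k)).foldl List.erase b := by
  intro d
  induction d with
  | nil => intro b; simp
  | cons h t ih =>
    intro b
    rw [List.foldl_cons, List.flatMap_cons, List.foldl_append,
      pv_iterate_erase_eq_foldl_replicate, ih]

-- count in the expansion of a duplicate-free key list.
theorem pv_count_flat (c : String → Nat) (x : String) :
    ∀ (d : List String), d.Nodup →
      List.count x (d.flatMap (fun k => List.replicate (c k) k)) = if x ∈ d then c x else 0 := by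
  intro d
  induction d with
  | nil => intro _; simp
  | cons h t ih =>
    intro hnd
    rcases List.nodup_cons.mp hnd with ⟨hh, ht⟩
    rw [List.flatMap_cons, List.count_append, List.count_replicate, ih ht]
    by_cases hx : x = h
    · subst hx
      simp [hh]
    · have hbe : (h == x) = false := by simp [Ne.symm hx]
      simp [hbe, hx]

-- the expansion of (distinct keys of req, multiplicities in req) is a permutation of req.
theorem pv_flat_perm (req : List String) :
    ((PySem.Set.ofList req).flatMap (fun k => List.replicate (List.count k req) k)).Perm req := by
  rw [List.perm_iff_count]
  intro x
  rw [pv_count_flat _ x _ (PySem.Set.nodup_ofList req)]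
  by_cases hx : x ∈ req
  · simp [PySem.Set.mem_ofList, hx]
  · simp [PySem.Set.mem_ofList, hx, List.count_eq_zero_of_not_mem hx]

-- main combinatorial step: A's dict-grouped removal equals B's direct one-pass removal.
theorem pv_removals_eq (req bezit : List String) :
    (PySem.Set.ofList req).foldl
        (fun bz k => (fun bz => bz.erase k)^[List.count k req] bz) bezit
      = req.foldl List.erase bezit := by
  rw [pv_grouped_eq_flat]
  exact List.Perm.foldl_eq (rcomm := ⟨fun b a₁ a₂ => List.erase_comm a₁ a₂⟩)
    (pv_flat_perm req) bezit

-- ===== VERDICT (by name: the statement is the Claim_ definition above) =====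
theorem wisselen_spec : Claim_equal_wisselen := by
  intro ruilmarkt grondstof bezit _ _
  unfold Spec_wisselen
  simp only [wisselen, wisselen_alt]
  rw [pv_mogelijk_eq_all]
  set req := ((PySem.Dict.mk ruilmarkt).get? grondstof).getD [] with hreq
  by_cases hall : req.all (fun r => bezit.contains r) = true
  · simp only [hall, beq_self_eq_true, if_true]
    have hcnt : berekenRuilmiddelen ruilmarkt [grondstof] = PySem.Dict.counter req := by
      simp only [berekenRuilmiddelen, List.foldl_cons, List.foldl_nil, ← hreq]
      exact (PySem.Dict.counter_eq_foldl req).symm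
    rw [hcnt, PySem.Dict.items_counter, List.foldl_map]
    congr 1
    have hstep : ∀ (bz : List String) (k : String),
        (PySem.List.pyRange 0 ((List.count k req : Int)) 1).foldl (fun bz _ =>
          match PySem.List.index? bz k with
          | some idx =>
            match PySem.List.pop? bz (idx : Int) with
            | some r => r.2
            | none => bz
          | none => bz) bz = (fun bz => bz.erase k)^[List.count k req] bz := by
      intro bz k
      have hfun : (fun (bz : List String) (_ : Int) =>
          match PySem.List.index? bz k with
          | some idx =>
            match PySem.List.pop? bz (idx : Int) with
            | some r => r.2
            | none => bz
          | none => bz) = fun bz _ => bz.erase k := by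
        funext bz' _
        exact pv_indexpop_eq_erase k bz'
      rw [hfun, pv_foldl_const, PySem.List.length_pyRange_one]
      simp
    have h1 : (PySem.Set.ofList req).foldl (fun bz k =>
          (PySem.List.pyRange 0 ((k, (List.count k req : Int)).2) 1).foldl (fun bz _ =>
            match PySem.List.index? bz (k, (List.count k req : Int)).1 with
            | some idx =>
              match PySem.List.pop? bz (idx : Int) with
              | some r => r.2
              | none => bz
            | none => bz) bz) bezit
        = (PySem.Set.ofList req).foldl
            (fun bz k => (fun bz => bz.erase k)^[List.count k req] bz) bezit :=
      List.foldl_ext _ _ _ (fun bz k _ => hstep bz k)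
    rw [h1, pv_removals_eq]
    exact List.foldl_ext _ _ _ (fun bz r _ => (pv_remove_eq_erase bz r).symm)
  · have hfalse : (req.all fun r => bezit.contains r) = false := by simpa using hall
    rw [hfalse]
    simp
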